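-- pv_equiv track=rewrite | github.com/X9X0/LabLink | server/discovery/visa_scanner.py | _parse_idn_response
-- ===== SOURCE A (Python) =====
-- def _parse_idn_response(idn_response: str) -> dict:
--     """Parse *IDN? response.
--
--     Standard format: MANUFACTURER,MODEL,SERIAL,FIRMWARE
--     Example: "Rigol Technologies,MSO2072A,DS1ZA123456789,00.01.02.00"
--
--     Args:
--         idn_response: *IDN? response string
--
--     Returns:
--         Parsed device info
--     """
--     info = {"raw_idn": idn_response}
--
--     # Split by comma
--     parts = [p.strip() for p in idn_response.split(",")]
--
--     if len(parts) >= 1: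
--         info["manufacturer"] = parts[0]
--     if len(parts) >= 2:
--         info["model"] = parts[1]
--     if len(parts) >= 3:
--         info["serial_number"] = parts[2]
--     if len(parts) >= 4:
--         info["firmware_version"] = parts[3]
--
--     return info
-- ===== SOURCE B (Python) =====
-- def _parse_idn_response(idn_response: str) -> dict:
--     """Parse *IDN? response with a single-pass character scanner: fields are
--     cut at commas while streaming, each completed token is stripped and bound
--     to the next pending field name (at most four)."""
--     info = {"raw_idn": idn_response}
--     names = ["manufacturer", "model", "serial_number", "firmware_version"]
--     token = ""
--     for ch in idn_response:
--         if ch == ",":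
--             if names:
--                 info[names[0]] = token.strip()
--                 names = names[1:]
--             token = ""
--         else:
--             token += ch
--     if names:
--         info[names[0]] = token.strip()
--     return info
-- ===== Notes on version B (the rewrite author's own statement) =====
-- stated objective: alternative
-- what changed: Replaces split-into-a-list plus four length-guarded assignments by a single-pass character scanner that cuts tokens at commas while streaming and binds each completed token to the next pending field name.
import Mathlib
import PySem

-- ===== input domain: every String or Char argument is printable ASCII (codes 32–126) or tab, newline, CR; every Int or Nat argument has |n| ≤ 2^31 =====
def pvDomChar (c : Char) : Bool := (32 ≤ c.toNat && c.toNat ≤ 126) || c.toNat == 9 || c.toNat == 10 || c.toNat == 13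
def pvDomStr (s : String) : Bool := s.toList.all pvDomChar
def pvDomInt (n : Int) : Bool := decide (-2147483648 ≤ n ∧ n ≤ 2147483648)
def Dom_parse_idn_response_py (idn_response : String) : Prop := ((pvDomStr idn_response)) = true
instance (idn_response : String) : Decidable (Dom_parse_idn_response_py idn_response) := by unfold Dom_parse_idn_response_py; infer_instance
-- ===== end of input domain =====

-- B replaces split-plus-guarded-assignments by a single-pass character scanner (same cost; return-value equivalence).


-- ===== PORT A =====
def parse_idn_response_py (idn_response : String) : List (String × String) :=
  let info := (PySem.Dict.empty : PySem.Dict String String).insert "raw_idn" idn_response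
  let parts := ((PySem.Str.split? idn_response ",").getD []).map PySem.Str.strip
  let info := if parts.length ≥ 1 then info.insert "manufacturer" (PySem.List.pyGetD parts 0 "") else info
  let info := if parts.length ≥ 2 then info.insert "model" (PySem.List.pyGetD parts 1 "") else info
  let info := if parts.length ≥ 3 then info.insert "serial_number" (PySem.List.pyGetD parts 2 "") else info
  let info := if parts.length ≥ 4 then info.insert "firmware_version" (PySem.List.pyGetD parts 3 "") else info
  info.items

-- ===== PORT B =====
-- one step of the scanner: comma closes the current token and binds it to the
-- next pending name; any other character extends the token
def pvScanStep (st : PySem.Dict String String × List String × String) (c : Char) :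
    PySem.Dict String String × List String × String :=
  if c = ',' then
    match st.2.1 with
    | [] => (st.1, [], "")
    | n :: rest => (st.1.insert n (PySem.Str.strip st.2.2), rest, "")
  else (st.1, st.2.1, st.2.2.push c)

def parse_idn_response_py_alt (idn_response : String) : List (String × String) :=
  let info := (PySem.Dict.empty : PySem.Dict String String).insert "raw_idn" idn_response
  let st := idn_response.toList.foldl pvScanStep
      (info, ["manufacturer", "model", "serial_number", "firmware_version"], "")
  (match st.2.1 with
   | [] => st.1
   | n :: _ => st.1.insert n (PySem.Str.strip st.2.2)).items

-- ===== PRECONDITION & SPEC =====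
def Spec_parse_idn_response_py (idn_response : String) (out : List (String × String)) : Prop := out = parse_idn_response_py_alt idn_response
instance (idn_response : String) (out : List (String × String)) : Decidable (Spec_parse_idn_response_py idn_response out) := by unfold Spec_parse_idn_response_py; infer_instance

-- ===== CLAIM (what is proved, stated in full; the proofs are below) =====
def Claim_equal_parse_idn_response_py : Prop := ∀ (idn_response : String), Dom_parse_idn_response_py idn_response → Spec_parse_idn_response_py idn_response (parse_idn_response_py idn_response)

-- ===== LEMMAS AND PROOFS =====

-- forward characterization of splitting a char list at commas
def pvChunks (pre : List Char) : List Char → List (List Char)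
  | [] => [pre]
  | c :: rest => if c = ',' then pre :: pvChunks [] rest else pvChunks (pre ++ [c]) rest

-- zip-style assignment of parts to pending names
def pvZipAssign (info : PySem.Dict String String) : List String → List String → PySem.Dict String String
  | n :: ns, p :: ps => pvZipAssign (info.insert n p) ns ps
  | _, _ => info

def pvFinish (st : PySem.Dict String String × List String × String) : PySem.Dict String String :=
  match st.2.1 with
  | [] => st.1
  | n :: _ => st.1.insert n (PySem.Str.strip st.2.2)

theorem pvGo_eq_chunks (fuel : Nat) (l cur : List Char) (acc : List (List Char)) (h : l.length < fuel) :
    PySem.Chars.splitOn.go [','] fuel l cur acc = acc.reverse ++ pvChunks cur.reverse l := by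
  induction fuel generalizing l cur acc with
  | zero => omega
  | succ fuel ih =>
    cases l with
    | nil => simp [PySem.Chars.splitOn.go, pvChunks]
    | cons c rest =>
      by_cases hc : c = ','
      · subst hc
        have hpre : List.isPrefixOf [','] (',' :: rest) = true := by
          simp [List.isPrefixOf]
        simp only [PySem.Chars.splitOn.go, hpre, if_pos]
        rw [ih _ _ _ (by simpa using Nat.lt_of_succ_lt_succ h)]
        simp [pvChunks]
      · have hpre : List.isPrefixOf [','] (c :: rest) = false := by
          simp [List.isPrefixOf]
          exact fun he => absurd he.symm hc
        simp only [PySem.Chars.splitOn.go, hpre, Bool.false_eq_true, if_false]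
        rw [ih _ _ _ (by simpa using Nat.lt_of_succ_lt_succ h)]
        simp [pvChunks, hc]

theorem pvSplitOn_eq_chunks (cs : List Char) :
    PySem.Chars.splitOn cs [','] = pvChunks [] cs := by
  unfold PySem.Chars.splitOn
  rw [pvGo_eq_chunks _ _ _ _ (by omega)]
  simp

theorem pvScan_eq_zipAssign (cs : List Char) (info : PySem.Dict String String)
    (names : List String) (tok : String) :
    pvFinish (cs.foldl pvScanStep (info, names, tok)) =
      pvZipAssign info names ((pvChunks tok.toList cs).map
        (fun ch => PySem.Str.strip (String.ofList ch))) := by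
  induction cs generalizing info names tok with
  | nil =>
    cases names with
    | nil => simp [pvFinish, pvZipAssign]
    | cons n ns => simp [pvFinish, pvChunks, pvZipAssign]
  | cons c rest ih =>
    by_cases hc : c = ','
    · subst hc
      cases names with
      | nil =>
        simp only [List.foldl_cons, pvScanStep, if_pos]
        rw [ih]
        simp [pvZipAssign]
      | cons n ns =>
        simp only [List.foldl_cons, pvScanStep, if_pos]
        rw [ih]
        simp [pvChunks, pvZipAssign]
    · simp only [List.foldl_cons, pvScanStep, if_neg hc]
      rw [ih]
      simp [pvChunks, hc]

theorem pvA_eq_zipAssign (info : PySem.Dict String String) (parts : List String) :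
    (let info := if parts.length ≥ 1 then info.insert "manufacturer" (PySem.List.pyGetD parts 0 "") else info
     let info := if parts.length ≥ 2 then info.insert "model" (PySem.List.pyGetD parts 1 "") else info
     let info := if parts.length ≥ 3 then info.insert "serial_number" (PySem.List.pyGetD parts 2 "") else info
     let info := if parts.length ≥ 4 then info.insert "firmware_version" (PySem.List.pyGetD parts 3 "") else info
     info) = pvZipAssign info ["manufacturer", "model", "serial_number", "firmware_version"] parts := by
  match parts with
  | [] => rfl
  | [_] => rfl
  | [_, _] => rfl
  | [_, _, _] => rfl
  | a :: b :: c :: d :: rest =>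
    simp only [PySem.List.pyGetD_ofNat', List.length_cons, ge_iff_le]
    split_ifs with h1 h2 h3 h4
    · simp [pvZipAssign]
    all_goals omega

theorem pvAlt_eq (s : String) :
    parse_idn_response_py_alt s =
      (pvZipAssign ((PySem.Dict.empty : PySem.Dict String String).insert "raw_idn" s)
        ["manufacturer", "model", "serial_number", "firmware_version"]
        ((pvChunks [] s.toList).map (fun ch => PySem.Str.strip (String.ofList ch)))).items := by
  show (pvFinish (s.toList.foldl pvScanStep (_, _, ""))).items = _
  rw [pvScan_eq_zipAssign]
  simp

-- ===== VERDICT (by name: the statement is the Claim_ definition above) =====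
theorem parse_idn_response_py_spec : Claim_equal_parse_idn_response_py := by
  intro s _
  unfold Spec_parse_idn_response_py parse_idn_response_py
  rw [pvAlt_eq]
  have hsplit : ((PySem.Str.split? s ",").getD []).map PySem.Str.strip =
      (pvChunks [] s.toList).map (fun ch => PySem.Str.strip (String.ofList ch)) := by
    simp [PySem.Str.split?, PySem.Chars.split?, pvSplitOn_eq_chunks, Function.comp]
  rw [hsplit]
  exact congrArg PySem.Dict.items (pvA_eq_zipAssign ((PySem.Dict.empty : PySem.Dict String String).insert "raw_idn" s) _)
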